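-- pv_equiv track=rewrite | github.com/m4dSt4cks/CTF_Resources | Crypto/ECB_breaker.py | get_start_len
-- ===== SOURCE A (Python) =====
-- BLOCKSIZE = 8
--
-- def get_start_len(blocks, offset):
-- 	last = ""
-- 	total = -1 * offset
-- 	cont = True
-- 	for block in blocks:
-- 		if cont:
-- 			if block == last:
-- 				total -= BLOCKSIZE
-- 				cont = False
-- 			else:
-- 				total += BLOCKSIZE
-- 				last = block
-- 	return total
-- ===== SOURCE B (Python) =====
-- BLOCKSIZE = 8
--
-- def _first_rep(prev, bs):
--     # divide and conquer: least index i with predecessor(bs, i) == bs[i],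
--     # where predecessor(bs, 0) = prev and predecessor(bs, i) = bs[i-1]
--     if not bs:
--         return None
--     if len(bs) == 1:
--         return 0 if bs[0] == prev else None
--     m = len(bs) // 2
--     left, right = bs[:m], bs[m:]
--     j = _first_rep(prev, left)
--     if j is not None:
--         return j
--     k = _first_rep(left[-1], right)
--     return None if k is None else m + k
--
-- def get_start_len(blocks, offset):
--     blocks = list(blocks)
--     j = _first_rep('', blocks)
--     if j is None:
--         return -offset + BLOCKSIZE * len(blocks)
--     return -offset + BLOCKSIZE * (j - 1)
-- ===== Notes on version B (the rewrite author's own statement) =====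
-- stated objective: alternative
-- what changed: B replaces A's running total/cont-flag linear accumulation with a divide-and-conquer search for the first adjacent-repeat index (recurse on the left half, else on the right half seeded with the left half's last block), finished by one closed-form arithmetic expression.
import Mathlib
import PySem

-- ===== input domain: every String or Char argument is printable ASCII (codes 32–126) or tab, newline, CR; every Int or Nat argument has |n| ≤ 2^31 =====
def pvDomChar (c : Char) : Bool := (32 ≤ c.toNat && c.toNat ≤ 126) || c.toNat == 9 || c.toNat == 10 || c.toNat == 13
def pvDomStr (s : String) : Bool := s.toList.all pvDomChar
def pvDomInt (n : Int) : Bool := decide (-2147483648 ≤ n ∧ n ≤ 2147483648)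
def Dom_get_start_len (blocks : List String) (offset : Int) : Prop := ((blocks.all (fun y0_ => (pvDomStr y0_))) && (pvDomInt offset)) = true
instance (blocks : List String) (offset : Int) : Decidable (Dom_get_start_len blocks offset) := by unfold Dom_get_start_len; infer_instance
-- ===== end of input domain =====

-- B replaces A's running total / cont-flag scan with a divide-and-conquer first-repeat search
-- plus one closed-form expression (alternative decomposition, same cost).

-- ===== PORT A =====
-- A's for-loop over blocks, carrying the state (last, total, cont) exactly as the Python does
def getStartLenLoop : List String → String → Int → Bool → Int
  | [], _, total, _ => total
  | b :: t, last, total, cont =>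
    if cont then
      if b == last then getStartLenLoop t last (total - 8) false
      else getStartLenLoop t b (total + 8) true
    else getStartLenLoop t last total cont

def get_start_len (blocks : List String) (offset : Int) : Int :=
  getStartLenLoop blocks "" (-1 * offset) true

-- ===== PORT B =====
-- B's _first_rep: divide and conquer, least i with predecessor == bs[i] (prev is the virtual
-- predecessor of bs[0]).  left[-1] is ported as getLastD (left is nonempty in that branch, so
-- the default is never used).
def firstRep (prev : String) (bs : List String) : Option Nat :=
  match bs with
  | [] => none
  | [b] => if b == prev then some 0 else none
  | b1 :: b2 :: rest =>
    let m := (b1 :: b2 :: rest).length / 2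
    match firstRep prev ((b1 :: b2 :: rest).take m) with
    | some j => some j
    | none =>
      (firstRep (((b1 :: b2 :: rest).take m).getLastD prev) ((b1 :: b2 :: rest).drop m)).map (m + ·)
termination_by bs.length
decreasing_by
  all_goals simp [List.length_take, List.length_drop]
  all_goals omega

def get_start_len_alt (blocks : List String) (offset : Int) : Int :=
  match firstRep "" blocks with
  | some j => -offset + 8 * ((j : Int) - 1)
  | none => -offset + 8 * (blocks.length : Int)

-- ===== PRECONDITION & SPEC =====
def Spec_get_start_len (blocks : List String) (offset : Int) (out : Int) : Prop := out = get_start_len_alt blocks offset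
instance (blocks : List String) (offset : Int) (out : Int) : Decidable (Spec_get_start_len blocks offset out) := by unfold Spec_get_start_len; infer_instance

-- ===== CLAIM =====
def Claim_equal_get_start_len : Prop := ∀ (blocks : List String) (offset : Int), Dom_get_start_len blocks offset → Spec_get_start_len blocks offset (get_start_len blocks offset)

-- ===== LEMMAS AND PROOFS =====
-- Linear characterisation of the first-repeat index, used to relate both ports.
def firstRepLin : String → List String → Option Nat
  | _, [] => none
  | prev, b :: t => if b == prev then some 0 else (firstRepLin b t).map (· + 1)

theorem firstRepLin_append (l r : List String) (prev : String) :
    firstRepLin prev (l ++ r) =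
      match firstRepLin prev l with
      | some j => some j
      | none => (firstRepLin (l.getLastD prev) r).map (l.length + ·) := by
  induction l generalizing prev with
  | nil => simp [firstRepLin]
  | cons b t ih =>
    by_cases h : b == prev
    · simp [firstRepLin, h]
    · simp only [List.cons_append, firstRepLin, h, if_false, Bool.false_eq_true, ih,
        List.getLastD_cons, List.length_cons]
      cases hf : firstRepLin b t with
      | some j => simp
      | none =>
        cases hg : firstRepLin (t.getLastD b) r with
        | none => simp
        | some k => simp; omega

theorem firstRep_eq (prev : String) (bs : List String) :
    firstRep prev bs = firstRepLin prev bs := by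
  induction prev, bs using firstRep.induct with
  | case1 prev => simp [firstRep, firstRepLin]
  | case2 prev b h => simp [firstRep, firstRepLin, h]
  | case3 prev b h => simp [firstRep, firstRepLin, h]
  | case4 prev b1 b2 rest m j hj ihtake =>
    have hlin : firstRepLin prev ((b1 :: b2 :: rest).take ((b1 :: b2 :: rest).length / 2)) = some j := by
      rw [← ihtake]; exact hj
    have h2 := firstRepLin_append ((b1 :: b2 :: rest).take ((b1 :: b2 :: rest).length / 2))
      ((b1 :: b2 :: rest).drop ((b1 :: b2 :: rest).length / 2)) prev
    simp only [List.take_append_drop] at h2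
    have hj' : firstRep prev ((b1 :: b2 :: rest).take ((b1 :: b2 :: rest).length / 2)) = some j := hj
    rw [firstRep]
    simp only [hj', h2, hlin]
  | case5 prev b1 b2 rest m hnone ihtake ihdrop =>
    have hlin : firstRepLin prev ((b1 :: b2 :: rest).take ((b1 :: b2 :: rest).length / 2)) = none := by
      rw [← ihtake]; exact hnone
    have hlen : ((b1 :: b2 :: rest).take ((b1 :: b2 :: rest).length / 2)).length
        = (b1 :: b2 :: rest).length / 2 := by
      rw [List.length_take]; simp; omega
    have h2 := firstRepLin_append ((b1 :: b2 :: rest).take ((b1 :: b2 :: rest).length / 2))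
      ((b1 :: b2 :: rest).drop ((b1 :: b2 :: rest).length / 2)) prev
    simp only [List.take_append_drop] at h2
    have hnone' : firstRep prev ((b1 :: b2 :: rest).take ((b1 :: b2 :: rest).length / 2)) = none := hnone
    have ihdrop' : firstRep (((b1 :: b2 :: rest).take ((b1 :: b2 :: rest).length / 2)).getLastD prev)
          ((b1 :: b2 :: rest).drop ((b1 :: b2 :: rest).length / 2))
        = firstRepLin (((b1 :: b2 :: rest).take ((b1 :: b2 :: rest).length / 2)).getLastD prev)
          ((b1 :: b2 :: rest).drop ((b1 :: b2 :: rest).length / 2)) := ihdrop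
    rw [firstRep]
    simp only [hnone', h2, hlin, ihdrop', hlen]

theorem getStartLenLoop_false (t : List String) (last : String) (total : Int) :
    getStartLenLoop t last total false = total := by
  induction t generalizing last total with
  | nil => rfl
  | cons b t ih => simp [getStartLenLoop, ih]

theorem getStartLenLoop_eq (bs : List String) (last : String) (total : Int) :
    getStartLenLoop bs last total true =
      match firstRepLin last bs with
      | some j => total + 8 * (j : Int) - 8
      | none => total + 8 * (bs.length : Int) := by
  induction bs generalizing last total with
  | nil => simp [getStartLenLoop, firstRepLin]
  | cons b t ih =>
    by_cases h : b == last
    · simp [getStartLenLoop, firstRepLin, h, getStartLenLoop_false]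
    · simp only [getStartLenLoop, firstRepLin, h, if_true, if_false, Bool.false_eq_true]
      rw [ih]
      cases hf : firstRepLin b t with
      | none => simp; ring
      | some j => simp; ring

-- ===== VERDICT =====
theorem get_start_len_spec : Claim_equal_get_start_len := by
  unfold Claim_equal_get_start_len
  intro blocks offset _
  unfold Spec_get_start_len get_start_len get_start_len_alt
  rw [getStartLenLoop_eq, firstRep_eq]
  cases h : firstRepLin "" blocks with
  | none => simp
  | some j => simp; ring
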